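-- pv_equiv track=rewrite | github.com/YuXuan928/Python | 1.Python/作業/作業2/2.3.1.math1.py | topic3
-- ===== SOURCE A (Python) =====
-- def topic3(n):
--     sum=0
--     st=''
--     for i in range(1, n+1):
--         sum+=2*i
--         if i<5:
--             st+=f'{2*i}+'
--     st+=f'...+{2*n}='
--     return sum, st
-- ===== SOURCE B (Python) =====
-- def topic3(n):
--     # closed form: sum of 2i for i=1..n is n*(n+1); the displayed prefix is a
--     # fixed-width slice of the constant "2+4+6+8+" (each term is 2 chars)
--     k = min(max(n, 0), 4)
--     total = n * (n + 1) if n > 0 else 0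
--     return total, "2+4+6+8+"[:2 * k] + f"...+{2 * n}="
-- ===== Notes on version B (the rewrite author's own statement) =====
-- stated objective: faster
-- what changed: Replaces the O(n) accumulation loop by the closed form n*(n+1) for the sum and a constant-string slice "2+4+6+8+"[:2*min(max(n,0),4)] for the display prefix.
import Mathlib
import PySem

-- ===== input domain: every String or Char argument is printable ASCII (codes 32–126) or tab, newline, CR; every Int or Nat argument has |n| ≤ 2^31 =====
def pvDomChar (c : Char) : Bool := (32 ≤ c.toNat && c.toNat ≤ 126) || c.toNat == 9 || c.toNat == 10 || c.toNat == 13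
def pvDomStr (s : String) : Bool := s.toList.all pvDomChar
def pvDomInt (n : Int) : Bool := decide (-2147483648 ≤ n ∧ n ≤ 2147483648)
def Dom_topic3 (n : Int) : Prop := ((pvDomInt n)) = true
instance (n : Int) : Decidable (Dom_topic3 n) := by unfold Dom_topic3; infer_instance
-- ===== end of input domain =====

-- B replaces A's O(n) loop by the closed form n*(n+1) and a constant-string slice for the prefix.
-- Strings are built on the List Char side (PySem convention); '+=' on str is list append.

-- ===== PORT A =====
-- the body of A's for-loop: sum += 2*i; if i < 5: st += f'{2*i}+'
def topic3Step (acc : Int × List Char) (i : Int) : Int × List Char :=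
  (acc.1 + 2 * i, if i < 5 then acc.2 ++ PySem.Int.toChars (2 * i) ++ ['+'] else acc.2)

def topic3 (n : Int) : Int × String :=
  let r := (PySem.List.pyRange 1 (n + 1) 1).foldl topic3Step (0, [])
  (r.1, String.ofList (r.2 ++ "...+".toList ++ PySem.Int.toChars (2 * n) ++ ['=']))

-- ===== PORT B =====
def topic3_alt (n : Int) : Int × String :=
  let k : Int := min (max n 0) 4
  ((if 0 < n then n * (n + 1) else 0),
   String.ofList (PySem.List.slice "2+4+6+8+".toList none (some (2 * k))
      ++ "...+".toList ++ PySem.Int.toChars (2 * n) ++ ['=']))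

-- ===== PRECONDITION & SPEC =====
def Spec_topic3 (n : Int) (out : Int × String) : Prop := out = topic3_alt n
instance (n : Int) (out : Int × String) : Decidable (Spec_topic3 n out) := by unfold Spec_topic3; infer_instance

-- ===== CLAIM (what is proved, stated in full; the proofs are below) =====
def Claim_equal_topic3 : Prop := ∀ (n : Int), Dom_topic3 n → Spec_topic3 n (topic3 n)

-- ===== LEMMAS AND PROOFS =====

-- loop invariant: after i = 1..m the accumulator is (m*(m+1), slice "2+4+6+8+"[:2*min m 4])
theorem topic3_loop (m : Nat) :
    (PySem.List.pyRange 1 ((m : Int) + 1) 1).foldl topic3Step (0, []) =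
      ((m : Int) * ((m : Int) + 1),
       PySem.List.slice "2+4+6+8+".toList none (some (2 * min (m : Int) 4))) := by
  induction m with
  | zero =>
      simp [PySem.List.pyRange_one_eq_nil, PySem.List.slice_to]
  | succ m ih =>
      have h1 : (1 : Int) ≤ (m : Int) + 1 := by omega
      rw [show ((m + 1 : Nat) : Int) + 1 = ((m : Int) + 1) + 1 by push_cast; ring,
          PySem.List.pyRange_one_succ_right h1, List.foldl_append, ih]
      simp only [List.foldl, topic3Step]
      rw [Prod.mk.injEq]
      constructor
      · push_cast; ring
      · by_cases hm : m < 4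
        · interval_cases m <;> decide
        · have h5 : ¬ ((m : Int) + 1 < 5) := by omega
          have hmin : min (m : Int) 4 = 4 := by omega
          have hmin' : min ((m : Int) + 1) 4 = 4 := by omega
          push_cast
          rw [hmin, hmin']
          simp [h5]

-- ===== VERDICT (by name: the statement is the Claim_ definition above) =====
theorem topic3_spec : Claim_equal_topic3 := by
  intro n _
  unfold Spec_topic3 topic3 topic3_alt
  by_cases hn : 0 < n
  · obtain ⟨m, rfl⟩ : ∃ m : Nat, n = (m : Int) := ⟨n.toNat, (Int.toNat_of_nonneg hn.le).symm⟩
    rw [topic3_loop]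
    have hmax : max (m : Int) 0 = (m : Int) := by omega
    simp
    omega
  · have hnil : PySem.List.pyRange 1 (n + 1) 1 = [] :=
      PySem.List.pyRange_one_eq_nil (by omega)
    have hmax : max n 0 = 0 := by omega
    rw [hnil, hmax]
    simp [hn, PySem.List.slice_to]
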